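-- pv_equiv track=rewrite | github.com/oksanatkach/word_sense_disambiguation | read_files.py | calc_context
-- ===== SOURCE A (Python) =====
-- punctuation = ["'",',','!','?','{','}','[',']','(',')','.','``',"''",':',';','`']
--
-- window = 10
--
-- def calc_context(words, side):
--
--     def add_token(token, context, i):
--         if token.isdigit():
--             context.append('<NUM>')
--             i += 1
--         else:
--             if token not in punctuation:
--                 if token not in ["''", "``"]:
--                     context.append(token)
--                     i += 1
--         return context, i
--
--     context = []
--
--     if len(words) < window:
--         for token in words:
--             context, _ = add_token(token, context, 0)
--     else:
--         if side == 'left':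
--             words = list(reversed(words))
--         i = 0
--         for token in words:
--             if i < window:
--                 context, i = add_token(token, context, i)
--     if side == 'left':
--         context = list(reversed(context))
--     return context
-- ===== SOURCE B (Python) =====
-- punctuation = ["'",',','!','?','{','}','[',']','(',')','.','``',"''",':',';','`']
--
-- window = 10
--
-- def calc_context(words, side):
--     filtered = ['<NUM>' if t.isdigit() else t
--                 for t in words
--                 if t.isdigit() or t not in punctuation]
--     return filtered[-window:] if side == 'left' else filtered[:window]
-- ===== Notes on version B (the rewrite author's own statement) =====
-- stated objective: simpler
-- what changed: B builds the filtered context once in a single comprehension and returns a slice (filtered[-window:] for 'left', filtered[:window] otherwise), eliminating A's two list reversals, the short-list special case and the manual window counter.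
-- intended difference: When side == 'left' and len(words) < window and the filtered context is not a palindrome, A returns the filtered context reversed (it reverses at the end without having reversed the input in the short branch), while B returns it in the original left-to-right order, which is the intended left context. — e.g. on calc_context(["alpha", "beta"], "left"): A returns ["beta", "alpha"], B returns ["alpha", "beta"]
import Mathlib
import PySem

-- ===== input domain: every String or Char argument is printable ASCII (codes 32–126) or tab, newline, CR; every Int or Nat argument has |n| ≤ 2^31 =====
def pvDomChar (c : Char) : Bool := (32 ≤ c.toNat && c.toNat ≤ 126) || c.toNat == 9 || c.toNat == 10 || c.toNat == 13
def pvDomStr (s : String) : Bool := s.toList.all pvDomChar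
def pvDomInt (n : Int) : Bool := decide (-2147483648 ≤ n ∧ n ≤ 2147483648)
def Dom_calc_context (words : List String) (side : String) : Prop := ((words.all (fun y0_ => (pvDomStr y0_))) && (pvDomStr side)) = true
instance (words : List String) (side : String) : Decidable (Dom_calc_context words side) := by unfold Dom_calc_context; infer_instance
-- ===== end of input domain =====

-- B builds the filtered context in one pass and returns a slice (filtered[-10:] for 'left',
-- filtered[:10] otherwise), replacing A's double reversal, short-list special case and window
-- counter; objective: simpler.

-- ===== PORT A =====
def pvPunct : List String :=
  ["'", ",", "!", "?", "{", "}", "[", "]", "(", ")", ".", "``", "''", ":", ";", "`"]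

def pvAddToken (token : String) (context : List String) (i : Int) : List String × Int :=
  if PySem.Str.strIsdigit token then (context ++ ["<NUM>"], i + 1)
  else
    if pvPunct.contains token = false then
      if (["''", "``"] : List String).contains token = false then (context ++ [token], i + 1)
      else (context, i)
    else (context, i)

def calc_context (words : List String) (side : String) : List String :=
  let context : List String := []
  let context :=
    if (words.length : Int) < 10 then
      words.foldl (fun c t => (pvAddToken t c 0).1) context
    else
      let ws := if side = "left" then words.reverse else words
      (ws.foldl (fun s t => if s.2 < 10 then pvAddToken t s.1 s.2 else s) (context, (0 : Int))).1
  if side = "left" then context.reverse else context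

-- ===== PORT B =====
def calc_context_alt (words : List String) (side : String) : List String :=
  let filtered :=
    (words.filter (fun t => PySem.Str.strIsdigit t || !pvPunct.contains t)).map
      (fun t => if PySem.Str.strIsdigit t then "<NUM>" else t)
  if side = "left" then PySem.List.slice filtered (some (-10)) none
  else PySem.List.slice filtered none (some 10)

-- ===== PRECONDITION & SPEC =====
/-- the token-level filter both programs apply, written as one filterMap (used to state D_) -/
def pvF (t : String) : Option String :=
  if PySem.Str.strIsdigit t then some "<NUM>"
  else if pvPunct.contains t then none else some t

-- On side == 'left' with fewer than window words and a non-palindromic filtered context, A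
-- returns the filtered context REVERSED (it reverses at the end without having reversed the
-- input), while B returns it in the original left-to-right order, the intended context window.
def D_calc_context (words : List String) (side : String) : Prop :=
  side = "left" ∧ (words.length : Int) < 10 ∧
    words.filterMap pvF ≠ (words.filterMap pvF).reverse
instance (words : List String) (side : String) : Decidable (D_calc_context words side) := by
  unfold D_calc_context; infer_instance

def Spec_calc_context (words : List String) (side : String) (out : List String) : Prop :=
  ¬ D_calc_context words side → out = calc_context_alt words side
instance (words : List String) (side : String) (out : List String) :
    Decidable (Spec_calc_context words side out) := by unfold Spec_calc_context; infer_instance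

def pvDiffWitness_calc_context : List String × String := (["alpha", "beta"], "left")
def pvDiffWitnessOut_calc_context : (List String) × (List String) :=
  (["beta", "alpha"], ["alpha", "beta"])

-- ===== CLAIM (what is proved, stated in full; the proofs are below) =====
def Claim_unchanged_calc_context : Prop := ∀ (words : List String) (side : String),
  Dom_calc_context words side → Spec_calc_context words side (calc_context words side)
def Claim_changed_calc_context : Prop :=
  Dom_calc_context (pvDiffWitness_calc_context.1) (pvDiffWitness_calc_context.2) ∧
  D_calc_context (pvDiffWitness_calc_context.1) (pvDiffWitness_calc_context.2) ∧
  calc_context (pvDiffWitness_calc_context.1) (pvDiffWitness_calc_context.2) = pvDiffWitnessOut_calc_context.1 ∧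
  calc_context_alt (pvDiffWitness_calc_context.1) (pvDiffWitness_calc_context.2) = pvDiffWitnessOut_calc_context.2 ∧
  pvDiffWitnessOut_calc_context.1 ≠ pvDiffWitnessOut_calc_context.2
def Claim_exact_calc_context : Prop := ∀ (words : List String) (side : String),
  Dom_calc_context words side → D_calc_context words side →
    calc_context words side ≠ calc_context_alt words side

-- ===== LEMMAS AND PROOFS =====
theorem pvAddToken_eq (t : String) (c : List String) (i : Int) :
    pvAddToken t c i = match pvF t with
      | some v => (c ++ [v], i + 1)
      | none => (c, i) := by
  unfold pvAddToken pvF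
  by_cases hd : PySem.Chars.strIsdigit t.toList = true
  · simp [hd]
  · by_cases hp : t ∈ pvPunct
    · simp [hd, hp]
    · have h2 : ¬t = "''" ∧ ¬t = "``" := by
        simp only [pvPunct, List.mem_cons, List.not_mem_nil, or_false] at hp
        push_neg at hp
        tauto
      simp [hd, hp, h2]

theorem pvB_filter_eq (ws : List String) :
    (ws.filter (fun t => PySem.Str.strIsdigit t || !pvPunct.contains t)).map
      (fun t => if PySem.Str.strIsdigit t then "<NUM>" else t) = ws.filterMap pvF := by
  induction ws with
  | nil => rfl
  | cons t rest ih =>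
    by_cases hd : PySem.Chars.strIsdigit t.toList = true
    · simpa [pvF, hd] using ih
    · by_cases hp : t ∈ pvPunct
      · simpa [pvF, hd, hp] using ih
      · simpa [pvF, hd, hp] using ih

theorem pvShort_foldl (ws : List String) (c : List String) :
    ws.foldl (fun c t => (pvAddToken t c 0).1) c = c ++ ws.filterMap pvF := by
  induction ws generalizing c with
  | nil => simp
  | cons t rest ih =>
    rw [List.foldl_cons, List.filterMap_cons]
    cases hft : pvF t with
    | none => rw [pvAddToken_eq, hft, ih]
    | some v => rw [pvAddToken_eq, hft, ih]; simp

theorem pvLoop_stop (ws : List String) (c : List String) (i : Int) (h : ¬ i < 10) :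
    ws.foldl (fun s t => if s.2 < 10 then pvAddToken t s.1 s.2 else s) (c, i) = (c, i) := by
  induction ws with
  | nil => rfl
  | cons t rest ih => simp [h, ih]

theorem pvLoop_foldl (ws : List String) (c : List String) (i : Int) (h0 : 0 ≤ i) :
    (ws.foldl (fun s t => if s.2 < 10 then pvAddToken t s.1 s.2 else s) (c, i)).1 =
      c ++ (ws.filterMap pvF).take (10 - i).toNat := by
  induction ws generalizing c i with
  | nil => simp
  | cons t rest ih =>
    rw [List.foldl_cons]
    by_cases hi : i < 10
    · rw [if_pos hi, pvAddToken_eq, List.filterMap_cons]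
      cases hft : pvF t with
      | none => rw [ih _ _ h0]
      | some v =>
        have htn : (10 - i).toNat = (10 - (i + 1)).toNat + 1 := by omega
        rw [ih _ _ (by omega), htn]
        simp
    · rw [if_neg hi, pvLoop_stop _ _ _ hi]
      have h0' : (10 - i).toNat = 0 := by omega
      simp [h0']

theorem pvRev_take_rev (l : List String) (k : Nat) :
    (l.reverse.take k).reverse = l.drop (l.length - k) := by
  rw [List.take_reverse, List.reverse_reverse]

theorem calc_context_eq_A (words : List String) (side : String) :
    calc_context words side =
      (if side = "left" then
        (if (words.length : Int) < 10 then words.filterMap pvF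
         else ((words.reverse.filterMap pvF).take 10)).reverse
       else
        (if (words.length : Int) < 10 then words.filterMap pvF
         else (words.filterMap pvF).take 10)) := by
  unfold calc_context
  by_cases hl : (words.length : Int) < 10 <;> by_cases hs : side = "left" <;>
    simp only [hl, hs, if_true, if_false] <;>
    first
      | (rw [pvShort_foldl]; simp)
      | (rw [pvLoop_foldl _ _ _ (by omega)]; simp [show ((10:Int)).toNat = 10 from rfl])

theorem calc_context_alt_eq (words : List String) (side : String) :
    calc_context_alt words side =
      (if side = "left" then (words.filterMap pvF).drop ((words.filterMap pvF).length - 10)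
       else (words.filterMap pvF).take 10) := by
  unfold calc_context_alt
  rw [pvB_filter_eq]
  by_cases hs : side = "left" <;> simp only [hs, if_true, if_false]
  · rw [PySem.List.slice_from_neg_ofNat _ 10 (by norm_num)]
  · rw [PySem.List.slice_to _ (by norm_num)]
    simp [show ((10:Int)).toNat = 10 from rfl]

-- ===== VERDICT (by name: the statement is the Claim_ definition above) =====
theorem calc_context_spec : Claim_unchanged_calc_context := by
  intro words side _ hnd
  rw [calc_context_eq_A, calc_context_alt_eq]
  by_cases hs : side = "left"
  · rw [if_pos hs, if_pos hs]
    by_cases hl : (words.length : Int) < 10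
    · -- short 'left' case: outside D_, the filtered context is a palindrome
      rcases eq_or_ne (words.filterMap pvF) (words.filterMap pvF).reverse with hpal | hne
      · have hdrop : (words.filterMap pvF).length - 10 = 0 := by
          have := List.length_filterMap_le pvF words
          omega
        rw [if_pos hl, hdrop, List.drop_zero, ← hpal]
      · exact absurd ⟨hs, hl, hne⟩ hnd
    · rw [if_neg hl, List.filterMap_reverse, pvRev_take_rev]
  · rw [if_neg hs, if_neg hs]
    by_cases hl : (words.length : Int) < 10
    · have hle : (words.filterMap pvF).length ≤ 10 := by
        have := List.length_filterMap_le pvF words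
        omega
      rw [if_pos hl, List.take_of_length_le hle]
    · rw [if_neg hl]

theorem calc_context_changed : Claim_changed_calc_context := by
  unfold Claim_changed_calc_context; decide

theorem calc_context_tight : Claim_exact_calc_context := by
  intro words side _ hd
  obtain ⟨hs, hl, hne⟩ := hd
  rw [calc_context_eq_A, calc_context_alt_eq, if_pos hs, if_pos hs, if_pos hl]
  have hdrop : (words.filterMap pvF).length - 10 = 0 := by
    have := List.length_filterMap_le pvF words
    omega
  rw [hdrop, List.drop_zero]
  exact fun h => hne h.symm
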